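-- pv_equiv track=rewrite | github.com/sueszli/vector-database-benchmark | dataset/python-mutated/loop_control_flow_test.py | continue_in_inner_while
-- ===== SOURCE A (Python) =====
-- def continue_in_inner_while(x, y):
--     if False:
--         return 10
--     s = 0
--     while x > 0:
--         x -= 1
--         while y > 0:
--             y -= 1
--             if (x + y) % 2 > 0:
--                 continue
--             s += x + y
--     return s
-- ===== SOURCE B (Python) =====
-- def continue_in_inner_while(x, y):
--     # The inner loop consumes y entirely during the first outer iteration
--     # (y never resets), so the result is just the sum of the even numbers
--     # in the range [x-1, x+y-2] when x > 0 and y > 0; closed form, O(1).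
--     if x <= 0 or y <= 0:
--         return 0
--     a = x - 1
--     b = x + y - 2
--     lo = a if a % 2 == 0 else a + 1
--     hi = b if b % 2 == 0 else b - 1
--     if lo > hi:
--         return 0
--     n = (hi - lo) // 2 + 1
--     return (lo + hi) * n // 2
-- ===== Notes on version B (the rewrite author's own statement) =====
-- stated objective: faster
-- what changed: Replaced the nested while loops (the inner loop only ever runs during the first outer iteration since y never resets) by a closed-form arithmetic-series sum of the even numbers in [x-1, x+y-2].
import Mathlib
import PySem

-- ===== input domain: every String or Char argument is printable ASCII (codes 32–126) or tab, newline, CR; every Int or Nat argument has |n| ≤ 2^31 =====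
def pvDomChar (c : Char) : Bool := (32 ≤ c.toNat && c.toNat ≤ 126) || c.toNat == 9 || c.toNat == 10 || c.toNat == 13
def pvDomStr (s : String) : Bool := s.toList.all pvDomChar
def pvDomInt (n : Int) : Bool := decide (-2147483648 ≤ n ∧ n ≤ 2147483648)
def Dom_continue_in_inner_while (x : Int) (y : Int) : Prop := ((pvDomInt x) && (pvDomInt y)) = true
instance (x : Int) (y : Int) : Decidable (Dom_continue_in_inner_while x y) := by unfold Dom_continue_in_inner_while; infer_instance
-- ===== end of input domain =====

-- B replaces A's nested while loops by a closed-form arithmetic-series sum (O(1)).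
-- ===== PORT A =====
-- inner `while y > 0` loop: returns the final (y, s) state
def pvInnerA (x : Int) (y : Int) (s : Int) : Int × Int :=
  if y > 0 then
    let y' := y - 1
    pvInnerA x y' (if (x + y') % 2 > 0 then s else s + (x + y'))
  else (y, s)
termination_by y.toNat
decreasing_by omega

-- outer `while x > 0` loop
def pvOuterA (x : Int) (y : Int) (s : Int) : Int :=
  if x > 0 then
    let x' := x - 1
    let p := pvInnerA x' y s
    pvOuterA x' p.1 p.2
  else s
termination_by x.toNat
decreasing_by omega

def continue_in_inner_while (x : Int) (y : Int) : Int :=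
  -- the `if False: return 10` branch is dead code
  pvOuterA x y 0

-- ===== PORT B =====
def continue_in_inner_while_alt (x : Int) (y : Int) : Int :=
  if x ≤ 0 ∨ y ≤ 0 then 0
  else
    let a := x - 1
    let b := x + y - 2
    let lo := if a % 2 == 0 then a else a + 1
    let hi := if b % 2 == 0 then b else b - 1
    if lo > hi then 0
    else
      let n := PySem.Int.floordiv (hi - lo) 2 + 1
      PySem.Int.floordiv ((lo + hi) * n) 2

-- ===== PRECONDITION & SPEC =====
def Spec_continue_in_inner_while (x : Int) (y : Int) (out : Int) : Prop := out = continue_in_inner_while_alt x y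
instance (x : Int) (y : Int) (out : Int) : Decidable (Spec_continue_in_inner_while x y out) := by unfold Spec_continue_in_inner_while; infer_instance

-- ===== CLAIM (what is proved, stated in full; the proofs are below) =====
def Claim_equal_continue_in_inner_while : Prop := ∀ (x : Int) (y : Int), Dom_continue_in_inner_while x y → Spec_continue_in_inner_while x y (continue_in_inner_while x y)

-- ===== LEMMAS AND PROOFS =====

-- the amount the inner loop adds to s when started at (x, y)
def pvE (x : Int) (y : Int) : Int :=
  if y > 0 then (if (x + (y - 1)) % 2 > 0 then 0 else x + (y - 1)) + pvE x (y - 1) else 0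
termination_by y.toNat
decreasing_by omega

theorem innerA_fst (x y s : Int) : (pvInnerA x y s).1 ≤ 0 := by
  rw [pvInnerA]
  by_cases h : y > 0
  · simp only [if_pos h]
    exact innerA_fst x (y - 1) _
  · simp only [if_neg h]; omega
termination_by y.toNat
decreasing_by omega

theorem innerA_snd (x y s : Int) : (pvInnerA x y s).2 = s + pvE x y := by
  rw [pvInnerA, pvE]
  by_cases h : y > 0
  · simp only [if_pos h]
    rw [innerA_snd x (y - 1)]
    split_ifs <;> ring
  · simp only [if_neg h]; ring
termination_by y.toNat
decreasing_by omega

theorem outer_noY (x y s : Int) (h : y ≤ 0) : pvOuterA x y s = s := by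
  rw [pvOuterA]
  by_cases hx : x > 0
  · simp only [if_pos hx]
    rw [pvInnerA]
    simp only [if_neg (by omega : ¬ y > 0)]
    exact outer_noY (x - 1) y s h
  · simp only [if_neg hx]
termination_by x.toNat
decreasing_by omega

theorem A_eq (x y : Int) :
    continue_in_inner_while x y = if x > 0 then pvE (x - 1) y else 0 := by
  unfold continue_in_inner_while
  rw [pvOuterA]
  by_cases hx : x > 0
  · simp only [if_pos hx]
    rw [outer_noY _ _ _ (innerA_fst (x - 1) y 0), innerA_snd]
    simp
  · simp only [if_neg hx]

-- closed form for pvE on nonnegative arguments: pvE x y = k*(x + x%2) + k*(k-1)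
-- where k is the number of even values among x, x+1, …, x+y-1
theorem pvE_closed (x y k : Int) (hx : 0 ≤ x) (hy : 0 ≤ y)
    (hk : (x % 2 = 0 ∧ k = (y + 1) / 2) ∨ (x % 2 = 1 ∧ k = y / 2)) :
    pvE x y = k * (x + x % 2) + k * (k - 1) := by
  rw [pvE]
  by_cases h : y > 0
  · simp only [if_pos h]
    rcases hk with ⟨hxe, hke⟩ | ⟨hxo, hke⟩
    · rw [pvE_closed x (y - 1) (y / 2) hx (by omega) (Or.inl ⟨hxe, by omega⟩)]
      by_cases hye : y % 2 = 0
      · rw [if_pos (by omega), hxe]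
        have e1 : y / 2 = k := by omega
        rw [e1]; ring
      · rw [if_neg (by omega), hxe]
        have e1 : y / 2 = k - 1 := by omega
        rw [e1, show y = 2 * k - 1 by omega]; ring
    · rw [pvE_closed x (y - 1) ((y - 1) / 2) hx (by omega) (Or.inr ⟨hxo, rfl⟩)]
      by_cases hye : y % 2 = 0
      · rw [if_neg (by omega), hxo]
        have e1 : (y - 1) / 2 = k - 1 := by omega
        rw [e1, show y = 2 * k by omega]; ring
      · rw [if_pos (by omega), hxo]
        have e1 : (y - 1) / 2 = k := by omega
        rw [e1]; ring
  · simp only [if_neg h]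
    have hy0 : y = 0 := by omega
    subst hy0
    have hk0 : k = 0 := by omega
    subst hk0
    ring
termination_by y.toNat
decreasing_by all_goals omega

theorem fdiv_two (a : Int) : PySem.Int.floordiv a 2 = a / 2 :=
  PySem.Int.floordiv_eq_ediv_of_pos (by norm_num)

theorem half_mul (S N c : Int) (h : S = 2 * c) : S * N / 2 = c * N := by
  subst h
  rw [mul_assoc, Int.mul_ediv_cancel_left _ (by norm_num : (2:Int) ≠ 0)]

theorem alt_closed (x y k : Int) (hx : 0 < x) (hy : 0 < y)
    (hk : ((x - 1) % 2 = 0 ∧ k = (y + 1) / 2) ∨ ((x - 1) % 2 = 1 ∧ k = y / 2)) :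
    continue_in_inner_while_alt x y = k * ((x - 1) + (x - 1) % 2) + k * (k - 1) := by
  unfold continue_in_inner_while_alt
  rw [if_neg (by omega)]
  simp only [beq_iff_eq, fdiv_two]
  rcases hk with ⟨he, hke⟩ | ⟨ho, hke⟩
  · split_ifs with h1 h2 h3 <;> try (exfalso; omega)
    · rw [show (x + y - 2 - (x - 1)) / 2 + 1 = k from by omega,
          half_mul _ k (x - 2 + k) (by omega), he]
      ring
    · rw [show (x + y - 2 - 1 - (x - 1)) / 2 + 1 = k from by omega,
          half_mul _ k (x - 2 + k) (by omega), he]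
      ring
  · split_ifs with h1 h2 h3 <;> try (exfalso; omega)
    · rw [show (x + y - 2 - (x - 1 + 1)) / 2 + 1 = k from by omega,
          half_mul _ k (x - 1 + k) (by omega), ho]
      ring
    · rw [show k = 0 from by omega]
      ring
    · rw [show (x + y - 2 - 1 - (x - 1 + 1)) / 2 + 1 = k from by omega,
          half_mul _ k (x - 1 + k) (by omega), ho]
      ring

-- ===== VERDICT (by name: the statement is the Claim_ definition above) =====
theorem continue_in_inner_while_spec : Claim_equal_continue_in_inner_while := by
  intro x y _
  unfold Spec_continue_in_inner_while
  by_cases hx : 0 < x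
  · by_cases hy : 0 < y
    · by_cases he : (x - 1) % 2 = 0
      · rw [A_eq, if_pos hx,
            pvE_closed (x - 1) y ((y + 1) / 2) (by omega) (by omega) (Or.inl ⟨he, rfl⟩),
            alt_closed x y ((y + 1) / 2) hx hy (Or.inl ⟨he, rfl⟩)]
      · rw [A_eq, if_pos hx,
            pvE_closed (x - 1) y (y / 2) (by omega) (by omega) (Or.inr ⟨by omega, rfl⟩),
            alt_closed x y (y / 2) hx hy (Or.inr ⟨by omega, rfl⟩)]
    · rw [A_eq, if_pos hx]
      unfold continue_in_inner_while_alt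
      rw [pvE]
      simp only [if_neg (by omega : ¬ y > 0)]
      rw [if_pos (by omega : x ≤ 0 ∨ y ≤ 0)]
  · rw [A_eq, if_neg hx]
    unfold continue_in_inner_while_alt
    rw [if_pos (by omega : x ≤ 0 ∨ y ≤ 0)]
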